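-- pv_equiv track=rewrite | github.com/Yg-Hong/algorithm | Divide&Conquer/Baekjoon_2447.py | starprinting
-- ===== SOURCE A (Python) =====
-- def starprinting(N: int):
-- 	if N == 3:
-- 		# pattern에 개행 문자 넣으면 안됨.
-- 		pattern = ["***", "* *", "***"]
-- 		return pattern
-- 	new_star = [i * 3 for i in starprinting(N // 3)] + \
-- 			   [i + ' ' * (N // 3) + i for i in starprinting(N // 3)] + \
-- 			   [i * 3 for i in starprinting(N // 3)]
-- 	return new_star
-- ===== SOURCE B (Python) =====
-- def starprinting(N: int):
--     # width chain: the spacer used at each assembly level, outermost first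
--     widths = []
--     v = N
--     while v > 3:
--         v //= 3
--         widths.append(v)
--     if v != 3:
--         raise ValueError("fractal has no 3x3 core: repeated //3 from N never hits 3")
--     k = len(widths)
--     base = ["***", "* *", "***"]
--     rows = []
--     for i in range(3 ** (k + 1)):
--         # build row i directly from the base-3 digits of i, innermost digit first
--         r = base[i % 3]
--         q = i // 3
--         for w in reversed(widths):
--             if q % 3 == 1:
--                 r = r + ' ' * w + r
--             else:
--                 r = r + r + r
--             q //= 3
--         rows.append(r)
--     return rows
-- ===== Notes on version B (the rewrite author's own statement) =====
-- stated objective: alternative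
-- what changed: B builds each output row independently from the base-3 digits of its row index together with a precomputed chain of spacer widths, instead of A's recursive whole-grid assembly that makes three identical recursive calls per level.
import Mathlib
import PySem

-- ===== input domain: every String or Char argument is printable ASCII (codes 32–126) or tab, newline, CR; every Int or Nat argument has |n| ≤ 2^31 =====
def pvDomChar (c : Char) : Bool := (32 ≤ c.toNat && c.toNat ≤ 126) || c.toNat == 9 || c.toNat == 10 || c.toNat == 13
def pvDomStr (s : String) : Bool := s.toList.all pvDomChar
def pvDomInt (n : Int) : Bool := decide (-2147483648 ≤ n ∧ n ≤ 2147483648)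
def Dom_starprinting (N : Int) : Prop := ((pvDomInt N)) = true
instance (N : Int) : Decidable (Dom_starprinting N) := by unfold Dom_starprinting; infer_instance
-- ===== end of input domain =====

-- B builds each row directly from the base-3 digits of its index plus a precomputed width chain, instead of A's recursive whole-grid assembly; A raises (RecursionError) outside Pre_.


-- ===== PORT A =====
-- A's rows are carried as List Char and wrapped into String only at the end (string work stays on List Char).
-- A's recursion has no base case for inputs whose //3-iterates miss 3 (Python RecursionError there): the port
-- carries a fuel parameter (N.toNat) that merely totalises the same computation; under Pre_ it never runs out.
def starAux : Nat → Int → List (List Char)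
  | 0, _ => []
  | f + 1, N =>
    if N = 3 then
      [['*','*','*'], ['*',' ','*'], ['*','*','*']]
    else
      (starAux f (PySem.Int.floordiv N 3)).map (fun i => i ++ i ++ i) ++
      (starAux f (PySem.Int.floordiv N 3)).map
        (fun i => i ++ List.replicate (PySem.Int.floordiv N 3).toNat ' ' ++ i) ++
      (starAux f (PySem.Int.floordiv N 3)).map (fun i => i ++ i ++ i)

def starprinting (N : Int) : List String :=
  (starAux N.toNat N).map String.ofList

-- ===== PORT B =====
-- the while loop 'while v > 3: v //= 3; widths.append(v)'; returns (widths, final v)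
def chainAux (v : Int) : List Int × Int :=
  if h : 3 < v then
    ((PySem.Int.floordiv v 3) :: (chainAux (PySem.Int.floordiv v 3)).1,
     (chainAux (PySem.Int.floordiv v 3)).2)
  else ([], v)
termination_by v.toNat
decreasing_by
  all_goals
    rw [PySem.Int.floordiv_eq_ediv_of_pos (by norm_num : (0:Int) < 3)]
    omega

def baseRows : List (List Char) := [['*','*','*'], ['*',' ','*'], ['*','*','*']]

-- one iteration of the inner loop: state (r, q)
def rowStep (s : List Char × Int) (w : Int) : List Char × Int :=
  if PySem.Int.mod s.2 3 = 1 then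
    (s.1 ++ List.replicate w.toNat ' ' ++ s.1, PySem.Int.floordiv s.2 3)
  else
    (s.1 ++ s.1 ++ s.1, PySem.Int.floordiv s.2 3)

-- r = base[i % 3]; q = i // 3; for w in reversed(widths): …
def rowFun (ws : List Int) (i : Int) : List Char :=
  (ws.reverse.foldl rowStep
    (PySem.List.pyGetD baseRows (PySem.Int.mod i 3) [], PySem.Int.floordiv i 3)).1

-- 'if v != 3: raise ValueError' — the raising branch is [] and lies outside Pre_
def starprinting_alt (N : Int) : List String :=
  if (chainAux N).2 = 3 then
    (PySem.List.pyRange 0 ((3:Int) ^ ((chainAux N).1.length + 1)) 1).map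
      (fun i => String.ofList (rowFun (chainAux N).1 i))
  else []

-- ===== PRECONDITION & SPEC =====
-- A returns exactly when iterating //3 from N hits 3, i.e. 3^k ≤ N < 4*3^(k-1) for some k ≥ 1
-- (elsewhere it recurses forever: RecursionError). The bound k < 41 only makes the ∃ decidable;
-- it is harmless, since Dom caps N far below 3^41.
def Pre_starprinting (N : Int) : Prop :=
  ∃ k, k < 41 ∧ 1 ≤ k ∧ (3:Int) ^ k ≤ N ∧ N < 4 * 3 ^ (k - 1)
instance (N : Int) : Decidable (Pre_starprinting N) := by unfold Pre_starprinting; infer_instance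
def pvWitness_starprinting : Int := (3)

def Spec_starprinting (N : Int) (out : List String) : Prop := out = starprinting_alt N
instance (N : Int) (out : List String) : Decidable (Spec_starprinting N out) := by
  unfold Spec_starprinting; infer_instance

-- ===== CLAIM (what is proved, stated in full; the proofs are below) =====
def Claim_equal_starprinting : Prop :=
  ∀ (N : Int), Dom_starprinting N → Pre_starprinting N → Spec_starprinting N (starprinting N)

-- ===== LEMMAS AND PROOFS =====

lemma chainAux_of_gt {v : Int} (h : 3 < v) :
    chainAux v = ((PySem.Int.floordiv v 3) :: (chainAux (PySem.Int.floordiv v 3)).1,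
      (chainAux (PySem.Int.floordiv v 3)).2) := by
  rw [chainAux]
  simp [h]

lemma chainAux_of_le {v : Int} (h : ¬ 3 < v) : chainAux v = ([], v) := by
  rw [chainAux]
  simp [h]

-- bounds of the next chain element
lemma chain_bounds {k : Nat} (hk : 1 ≤ k) {N : Int}
    (hlo : (3:Int) ^ (k + 1) ≤ N) (hhi : N < 4 * 3 ^ k) :
    (3:Int) ^ k ≤ PySem.Int.floordiv N 3 ∧ PySem.Int.floordiv N 3 < 4 * 3 ^ (k - 1) := by
  rw [PySem.Int.floordiv_eq_ediv_of_pos (by norm_num : (0:Int) < 3)]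
  have h1 : (3:Int) ^ (k + 1) = 3 * 3 ^ k := by rw [pow_succ]; ring
  have h2 : (3:Int) ^ k = 3 * 3 ^ (k - 1) := by
    conv_lhs => rw [show k = (k - 1) + 1 from by omega]
    rw [pow_succ]; ring
  omega

-- the chain for N in the k-th interval has length k - 1 and ends at the 3x3 core
lemma chain_spec : ∀ k, 1 ≤ k → ∀ N : Int,
    (3:Int) ^ k ≤ N → N < 4 * 3 ^ (k - 1) →
    (chainAux N).1.length = k - 1 ∧ (chainAux N).2 = 3 := by
  intro k hk
  induction k, hk using Nat.le_induction with
  | base =>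
    intro N hlo hhi
    norm_num at hlo hhi
    have hN : N = 3 := by omega
    subst hN
    rw [chainAux_of_le (by omega)]
    exact ⟨rfl, rfl⟩
  | succ k hk ih =>
    intro N hlo hhi
    have h9 : (9:Int) ≤ 3 ^ (k + 1) := by
      calc (9:Int) = 3 ^ 2 := by norm_num
        _ ≤ 3 ^ (k + 1) := pow_le_pow_right₀ (by norm_num) (by omega)
    have hhi' : N < 4 * 3 ^ k := by simpa using hhi
    have hb := chain_bounds hk hlo hhi'
    have h3 : 3 < N := by omega
    have hih := ih _ hb.1 hb.2
    rw [chainAux_of_gt h3]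
    refine ⟨?_, hih.2⟩
    rw [List.length_cons, hih.1]
    omega

-- splitting a map over range (m+(m+m)) into its three blocks
lemma range_split3 {α : Type} (m : Nat) (R : Nat → α) :
    (List.range (m + (m + m))).map R =
      (List.range m).map R ++
        ((List.range m).map (fun x => R (m + x)) ++
          (List.range m).map (fun x => R (m + (m + x)))) := by
  simp only [List.range_add, List.map_append, List.map_map]
  simp [Function.comp_def]

-- a top digit d added to q passes through the fold untouched until the end
lemma fold_top : ∀ (us : List Int) (r : List Char) (q d : Int), 0 ≤ q → q < 3 ^ us.length →
    us.foldl rowStep (r, q + d * 3 ^ us.length) = ((us.foldl rowStep (r, q)).1, d) := by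
  intro us
  induction us with
  | nil =>
    intro r q d hq0 hq
    simp only [List.length_nil, pow_zero] at hq
    have hq' : q = 0 := by omega
    subst hq'
    simp [List.foldl]
  | cons u us ih =>
    intro r q d hq0 hq
    have hL : d * (3:Int) ^ (u :: us).length = 3 * (d * 3 ^ us.length) := by
      rw [List.length_cons, pow_succ]; ring
    have hL' : (3:Int) ^ (u :: us).length = 3 * 3 ^ us.length := by
      rw [List.length_cons, pow_succ]; ring
    have hmodeq : PySem.Int.mod (q + d * 3 ^ (u :: us).length) 3 = PySem.Int.mod q 3 := by
      rw [hL, PySem.Int.mod_eq_emod_of_pos (by norm_num : (0:Int) < 3),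
          PySem.Int.mod_eq_emod_of_pos (by norm_num : (0:Int) < 3)]
      omega
    have hdiveq : PySem.Int.floordiv (q + d * 3 ^ (u :: us).length) 3 =
        PySem.Int.floordiv q 3 + d * 3 ^ us.length := by
      rw [hL, PySem.Int.floordiv_eq_ediv_of_pos (by norm_num : (0:Int) < 3),
          PySem.Int.floordiv_eq_ediv_of_pos (by norm_num : (0:Int) < 3)]
      omega
    have hq3 : 0 ≤ PySem.Int.floordiv q 3 ∧ PySem.Int.floordiv q 3 < 3 ^ us.length := by
      rw [PySem.Int.floordiv_eq_ediv_of_pos (by norm_num : (0:Int) < 3)]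
      rw [hL'] at hq
      omega
    simp only [List.foldl_cons]
    rw [show rowStep (r, q + d * 3 ^ (u :: us).length) u =
        (if PySem.Int.mod q 3 = 1 then (r ++ List.replicate u.toNat ' ' ++ r, PySem.Int.floordiv q 3 + d * 3 ^ us.length)
         else (r ++ r ++ r, PySem.Int.floordiv q 3 + d * 3 ^ us.length)) from by
      unfold rowStep; rw [hmodeq, hdiveq],
      show rowStep (r, q) u =
        (if PySem.Int.mod q 3 = 1 then (r ++ List.replicate u.toNat ' ' ++ r, PySem.Int.floordiv q 3)
         else (r ++ r ++ r, PySem.Int.floordiv q 3)) from by unfold rowStep; rfl]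
    by_cases hb : PySem.Int.mod q 3 = 1
    · rw [if_pos hb, if_pos hb]
      exact ih _ _ d hq3.1 hq3.2
    · rw [if_neg hb, if_neg hb]
      exact ih _ _ d hq3.1 hq3.2

-- the row of a composite index in terms of the row of its low part
lemma rowFun_cons (ws : List Int) (w0 d t : Int)
    (ht0 : 0 ≤ t) (ht : t < 3 ^ (ws.length + 1)) (hd0 : 0 ≤ d) (hd : d < 3) :
    rowFun (w0 :: ws) (d * 3 ^ (ws.length + 1) + t) =
      (if d = 1 then rowFun ws t ++ List.replicate w0.toNat ' ' ++ rowFun ws t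
       else rowFun ws t ++ rowFun ws t ++ rowFun ws t) := by
  have hsplit : d * (3:Int) ^ (ws.length + 1) = 3 * (d * 3 ^ ws.length) := by
    rw [pow_succ]; ring
  have hP : (3:Int) ^ (ws.length + 1) = 3 * 3 ^ ws.length := by rw [pow_succ]; ring
  have hmodeq : PySem.Int.mod (d * 3 ^ (ws.length + 1) + t) 3 = PySem.Int.mod t 3 := by
    rw [hsplit, PySem.Int.mod_eq_emod_of_pos (by norm_num : (0:Int) < 3),
        PySem.Int.mod_eq_emod_of_pos (by norm_num : (0:Int) < 3)]
    omega
  have hdiveq : PySem.Int.floordiv (d * 3 ^ (ws.length + 1) + t) 3 =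
      PySem.Int.floordiv t 3 + d * 3 ^ ws.length := by
    rw [hsplit, PySem.Int.floordiv_eq_ediv_of_pos (by norm_num : (0:Int) < 3),
        PySem.Int.floordiv_eq_ediv_of_pos (by norm_num : (0:Int) < 3)]
    omega
  have ht3 : 0 ≤ PySem.Int.floordiv t 3 ∧ PySem.Int.floordiv t 3 < 3 ^ ws.length := by
    rw [PySem.Int.floordiv_eq_ediv_of_pos (by norm_num : (0:Int) < 3)]
    rw [hP] at ht
    omega
  have hrev : (w0 :: ws).reverse = ws.reverse ++ [w0] := by simp
  have hlen : ws.reverse.length = ws.length := List.length_reverse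
  unfold rowFun
  have hft := fold_top ws.reverse (PySem.List.pyGetD baseRows (PySem.Int.mod t 3) [])
    (PySem.Int.floordiv t 3) d (by omega) (by rw [hlen]; omega)
  rw [hlen] at hft
  rw [hrev, List.foldl_append, hmodeq, hdiveq, hft]
  have hdmod : PySem.Int.mod d 3 = d := by
    rw [PySem.Int.mod_eq_emod_of_pos (by norm_num : (0:Int) < 3)]
    omega
  simp only [List.foldl_cons, List.foldl_nil, rowStep, hdmod]
  by_cases hd1 : d = 1
  · rw [if_pos hd1, if_pos hd1]
  · rw [if_neg hd1, if_neg hd1]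

-- A's value on its whole domain, as B computes it: row i is built from the digits of i
lemma main_eq : ∀ k, 1 ≤ k → ∀ N : Int, (3:Int) ^ k ≤ N → N < 4 * 3 ^ (k - 1) → ∀ f, k ≤ f →
    starAux f N = (List.range (3 ^ k)).map (fun i : Nat => rowFun (chainAux N).1 (i : Int)) := by
  intro k hk
  induction k, hk using Nat.le_induction with
  | base =>
    intro N hlo hhi f hf
    norm_num at hlo hhi
    have hN : N = 3 := by omega
    subst hN
    match f, hf with
    | f + 1, _ =>
      rw [show starAux (f + 1) 3 = [['*','*','*'], ['*',' ','*'], ['*','*','*']] from by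
        simp [starAux]]
      rw [chainAux_of_le (by norm_num)]
      decide
  | succ k hk ih =>
    intro N hlo hhi f hf
    match f, hf with
    | f + 1, hf =>
    have hsucc : (k + 1) - 1 = k := by omega
    rw [hsucc] at hhi
    have h9 : (9:Int) ≤ 3 ^ (k + 1) := by
      calc (9:Int) = 3 ^ 2 := by norm_num
        _ ≤ 3 ^ (k + 1) := pow_le_pow_right₀ (by norm_num) (by omega)
    have hne : N ≠ 3 := by omega
    have hgt : 3 < N := by omega
    have hb := chain_bounds hk hlo hhi
    have hlen : (chainAux (PySem.Int.floordiv N 3)).1.length = k - 1 :=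
      (chain_spec k hk _ hb.1 hb.2).1
    have hlen1 : (chainAux (PySem.Int.floordiv N 3)).1.length + 1 = k := by omega
    have hIH := ih (PySem.Int.floordiv N 3) hb.1 hb.2 f (by omega)
    have hpow : ((3:Int)) ^ (((chainAux (PySem.Int.floordiv N 3)).1).length + 1) =
        ((3 ^ k : Nat) : Int) := by
      rw [hlen1]; push_cast; ring
    rw [show starAux (f + 1) N =
        if N = 3 then
          [['*','*','*'], ['*',' ','*'], ['*','*','*']]
        else
          (starAux f (PySem.Int.floordiv N 3)).map (fun i => i ++ i ++ i) ++
          (starAux f (PySem.Int.floordiv N 3)).map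
            (fun i => i ++ List.replicate (PySem.Int.floordiv N 3).toNat ' ' ++ i) ++
          (starAux f (PySem.Int.floordiv N 3)).map (fun i => i ++ i ++ i) from rfl,
      if_neg hne, hIH, chainAux_of_gt hgt]
    have h3n : (3:Nat) ^ (k + 1) = 3 ^ k + (3 ^ k + 3 ^ k) := by rw [pow_succ]; ring
    conv_rhs => rw [h3n, range_split3]
    simp only [List.map_map, Function.comp_def]
    rw [List.append_assoc]
    congr 1
    · refine List.map_congr_left fun t htm => ?_
      have htk : ((t:Int)) < 3 ^ (((chainAux (PySem.Int.floordiv N 3)).1).length + 1) := by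
        rw [hpow]; exact_mod_cast List.mem_range.mp htm
      have h := rowFun_cons ((chainAux (PySem.Int.floordiv N 3)).1) (PySem.Int.floordiv N 3)
        0 t (by positivity) htk (by norm_num) (by norm_num)
      rw [show (0:Int) * 3 ^ (((chainAux (PySem.Int.floordiv N 3)).1).length + 1) + (t:Int) = (t:Int)
        from by ring, if_neg (by norm_num)] at h
      rw [h]
    congr 1
    · refine List.map_congr_left fun t htm => ?_
      have htk : ((t:Int)) < 3 ^ (((chainAux (PySem.Int.floordiv N 3)).1).length + 1) := by
        rw [hpow]; exact_mod_cast List.mem_range.mp htm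
      have h := rowFun_cons ((chainAux (PySem.Int.floordiv N 3)).1) (PySem.Int.floordiv N 3)
        1 t (by positivity) htk (by norm_num) (by norm_num)
      rw [if_pos rfl] at h
      rw [show ((3 ^ k + t : Nat) : Int) =
        1 * 3 ^ (((chainAux (PySem.Int.floordiv N 3)).1).length + 1) + (t:Int) from by
          rw [hpow]; push_cast; ring, h]
    · refine List.map_congr_left fun t htm => ?_
      have htk : ((t:Int)) < 3 ^ (((chainAux (PySem.Int.floordiv N 3)).1).length + 1) := by
        rw [hpow]; exact_mod_cast List.mem_range.mp htm
      have h := rowFun_cons ((chainAux (PySem.Int.floordiv N 3)).1) (PySem.Int.floordiv N 3)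
        2 t (by positivity) htk (by norm_num) (by norm_num)
      rw [if_neg (by norm_num)] at h
      rw [show ((3 ^ k + (3 ^ k + t) : Nat) : Int) =
        2 * 3 ^ (((chainAux (PySem.Int.floordiv N 3)).1).length + 1) + (t:Int) from by
          rw [hpow]; push_cast; ring, h]

-- ===== VERDICT (by name: the statement is the Claim_ definition above) =====
theorem starprinting_spec : Claim_equal_starprinting := by
  rintro N - ⟨k, -, hk1, hlo, hhi⟩
  unfold Spec_starprinting starprinting starprinting_alt
  have hcs := chain_spec k hk1 N hlo hhi
  have hlen1 : (chainAux N).1.length + 1 = k := by omega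
  have hkpow : k ≤ 3 ^ k := le_of_lt (Nat.lt_pow_self (by norm_num))
  have hcast : ((3 ^ k : Nat) : Int) ≤ N := by push_cast; exact hlo
  have hfuel : k ≤ N.toNat := by omega
  rw [main_eq k hk1 N hlo hhi N.toNat hfuel, if_pos hcs.2, hlen1, PySem.List.pyRange_one]
  have hto : ((3:Int) ^ k - 0).toNat = 3 ^ k := by
    have h1 : (3:Int) ^ k = ((3 ^ k : Nat) : Int) := by push_cast; ring
    omega
  rw [hto]
  simp [List.map_map, Function.comp_def]
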